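-- pv_equiv track=rewrite | github.com/MightyXdash/ONCard | src/studymate/workers/followup_worker.py | _append_stream_text
-- ===== SOURCE A (Python) =====
-- def _append_stream_text(current: str, piece: str) -> str:
--     chunk = str(piece or "")
--     if not chunk:
--         return current
--     if chunk.startswith(current):
--         return chunk
--     if current.endswith(chunk):
--         return current
--     overlap_limit = min(len(current), len(chunk))
--     for size in range(overlap_limit, 0, -1):
--         if current.endswith(chunk[:size]):
--             return current + chunk[size:]
--     return current + chunk
-- ===== SOURCE B (Python) =====
-- def _append_stream_text(current: str, piece: str) -> str:
--     # KMP prefix function on piece + '\x00' + current: the final state is the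
--     # length of the longest prefix of piece that is a suffix of current.
--     if not piece:
--         return current
--     s = piece + "\x00" + current
--     n = len(s)
--     pi = [0] * n
--     k = 0
--     for i in range(1, n):
--         c = s[i]
--         while k > 0 and s[k] != c:
--             k = pi[k - 1]
--         if s[k] == c:
--             k += 1
--         pi[i] = k
--     return current + piece[k:]
-- ===== Notes on version B (the rewrite author's own statement) =====
-- stated objective: faster
-- what changed: Replaces A's descending brute-force scan over overlap sizes (an endswith string-compare per candidate size) by a single KMP prefix-function pass over piece + '\x00' + current whose final state is the maximal overlap, dropping A's special-case branches.
import Mathlib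
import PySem

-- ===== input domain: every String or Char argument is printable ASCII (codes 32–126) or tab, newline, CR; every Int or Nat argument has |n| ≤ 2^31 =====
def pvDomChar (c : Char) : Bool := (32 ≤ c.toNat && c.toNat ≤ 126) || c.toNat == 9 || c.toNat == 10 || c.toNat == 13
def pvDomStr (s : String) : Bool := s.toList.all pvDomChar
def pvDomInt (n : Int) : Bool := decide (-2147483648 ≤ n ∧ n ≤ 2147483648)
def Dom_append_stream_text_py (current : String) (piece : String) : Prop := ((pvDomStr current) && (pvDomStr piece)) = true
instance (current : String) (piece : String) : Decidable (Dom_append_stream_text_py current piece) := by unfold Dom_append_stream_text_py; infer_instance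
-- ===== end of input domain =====

-- B replaces A's descending brute-force overlap scan (each step an endswith
-- compare) by a single KMP prefix-function pass over piece + '\x00' + current;
-- same return value on the stated domain.

-- ===== PORT A =====
-- for size in range(overlap_limit, 0, -1): if current.endswith(chunk[:size]): return current + chunk[size:]
def pvALoop (current chunk : List Char) : List Int → List Char
  | [] => current ++ chunk
  | size :: rest =>
      if PySem.Chars.endswith current (PySem.List.slice chunk none (some size)) then
        current ++ PySem.List.slice chunk (some size) none
      else pvALoop current chunk rest

def pvAMain (current piece : List Char) : List Char :=
  let chunk := if piece = [] then [] else piece   -- chunk = str(piece or "")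
  if chunk = [] then current
  else if PySem.Chars.startswith chunk current then chunk
  else if PySem.Chars.endswith current chunk then current
  else pvALoop current chunk (PySem.List.pyRange ((min current.length chunk.length : Nat) : Int) 0 (-1))

def append_stream_text_py (current : String) (piece : String) : String :=
  String.ofList (pvAMain current.toList piece.toList)

-- ===== PORT B =====
-- while k > 0 and s[k] != c: k = pi[k-1]    (fuel = k: k strictly decreases)
def pvKmpWhile (s : List Char) (pi : List Nat) (c : Char) : Nat → Nat → Nat
  | 0, k => k
  | fuel + 1, k =>
      if 0 < k ∧ s.getD k ' ' ≠ c then pvKmpWhile s pi c fuel (pi.getD (k - 1) 0) else k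

-- for i in range(1, n): c = s[i]; <while>; if s[k] == c: k += 1; pi[i] = k
def pvPiLoop (s : List Char) : List Char → Nat → List Nat → Nat
  | [], k, _ => k
  | c :: rest, k, pi =>
      let k1 := pvKmpWhile s pi c k k
      let k2 := if s.getD k1 ' ' = c then k1 + 1 else k1
      pvPiLoop s rest k2 (pi ++ [k2])

def pvBMain (current piece : List Char) : List Char :=
  if piece = [] then current
  else
    let s := piece ++ '\x00' :: current
    let k := pvPiLoop s s.tail 0 [0]
    current ++ piece.drop k

def append_stream_text_py_alt (current : String) (piece : String) : String :=
  String.ofList (pvBMain current.toList piece.toList)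

-- ===== PRECONDITION & SPEC =====
def Spec_append_stream_text_py (current : String) (piece : String) (out : String) : Prop := out = append_stream_text_py_alt current piece
instance (current : String) (piece : String) (out : String) : Decidable (Spec_append_stream_text_py current piece out) := by unfold Spec_append_stream_text_py; infer_instance

-- ===== CLAIM (what is proved, stated in full; the proofs are below) =====
def Claim_equal_append_stream_text_py : Prop := ∀ (current : String) (piece : String), Dom_append_stream_text_py current piece → Spec_append_stream_text_py current piece (append_stream_text_py current piece)

-- ===== LEMMAS AND PROOFS =====

-- the greatest overlap: largest j with (piece's first j chars) a suffix of current
def pvOv (piece current : List Char) : Nat :=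
  Nat.findGreatest (fun j => piece.take j <:+ current) (min piece.length current.length)

-- the longest j < t.length with (s's first j chars) a suffix of t  (borders when t is a prefix of s)
def pvBrd (s t : List Char) : Nat :=
  Nat.findGreatest (fun j => s.take j <:+ t) (t.length - 1)

-- generic helpers -----------------------------------------------------------

theorem pv_suffix_of_suffix_le {l₁ l₂ t : List Char} (h1 : l₁ <:+ t) (h2 : l₂ <:+ t)
    (h : l₁.length ≤ l₂.length) : l₁ <:+ l₂ :=
  List.suffix_of_suffix_length_le h1 h2 h

theorem pv_snoc_suffix_snoc {l₁ l₂ : List Char} {a b : Char} :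
    (l₁ ++ [a]) <:+ (l₂ ++ [b]) ↔ l₁ <:+ l₂ ∧ a = b := by
  constructor
  · rintro ⟨w, hw⟩
    have hlen : w.length + (l₁.length + 1) = l₂.length + 1 := by
      have := congrArg List.length hw; simpa [Nat.add_assoc] using this
    have h2 : w ++ l₁ ++ [a] = l₂ ++ [b] := by simpa [List.append_assoc] using hw
    have h3 : w ++ l₁ = l₂ ∧ a = b := by
      have := List.append_inj' h2 (by simp)
      exact ⟨by simpa using this.1, by simpa using this.2⟩
    exact ⟨⟨w, h3.1⟩, h3.2⟩
  · rintro ⟨⟨w, hw⟩, rfl⟩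
    exact ⟨w, by simp [← hw, List.append_assoc]⟩

theorem pv_take_succ_getD {l : List Char} {m : Nat} (h : m < l.length) :
    l.take (m + 1) = l.take m ++ [l.getD m ' '] := by
  rw [List.getD_eq_getElem l ' ' h]
  rw [List.take_add_one]
  simp [List.getElem?_eq_getElem h]

theorem pv_fg_congr {P Q : Nat → Prop} [DecidablePred P] [DecidablePred Q] {b : Nat}
    (h : ∀ m, m ≤ b → (P m ↔ Q m)) : Nat.findGreatest P b = Nat.findGreatest Q b := by
  induction b with
  | zero => simp
  | succ n ih =>
      rw [Nat.findGreatest_succ, Nat.findGreatest_succ, ih (fun m hm => h m (by omega))]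
      by_cases hP : P (n+1)
      · rw [if_pos hP, if_pos ((h (n+1) le_rfl).mp hP)]
      · rw [if_neg hP, if_neg (fun hQ => hP ((h (n+1) le_rfl).mpr hQ))]

theorem pv_fg_shrink {P : Nat → Prop} [DecidablePred P] {b b' : Nat} (hb : b' ≤ b)
    (h : ∀ m, b' < m → m ≤ b → ¬ P m) : Nat.findGreatest P b = Nat.findGreatest P b' := by
  induction b with
  | zero =>
      have : b' = 0 := by omega
      subst this; rfl
  | succ n ih =>
      rcases Nat.lt_or_ge n b' with hlt | hge
      · have : b' = n + 1 := by omega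
        subst this; rfl
      · rw [Nat.findGreatest_succ, if_neg (h (n+1) (by omega) le_rfl), ih hge
          (fun m h1 h2 => h m h1 (by omega))]

theorem pvBrd_suffix (s t : List Char) : s.take (pvBrd s t) <:+ t := by
  exact Nat.findGreatest_spec (P := fun j => s.take j <:+ t) (Nat.zero_le _) (by simp)

theorem pvBrd_le (s t : List Char) : pvBrd s t ≤ t.length - 1 := Nat.findGreatest_le _

theorem pv_le_brd {s t : List Char} {j : Nat} (hj : j ≤ t.length - 1)
    (h : s.take j <:+ t) : j ≤ pvBrd s t := Nat.le_findGreatest hj h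

-- KMP while-loop correctness -----------------------------------------------

theorem pvKmpWhile_spec (s : List Char) (pi : List Nat) (c : Char) (i : Nat)
    (hi : i ≤ s.length)
    (hpi : ∀ j, j < i → pi.getD j 0 = pvBrd s (s.take (j + 1))) :
    ∀ fuel k, k ≤ fuel → k < i → s.take k <:+ s.take i →
      pvKmpWhile s pi c fuel k
        = Nat.findGreatest (fun m => s.take m <:+ s.take i ∧ s.getD m ' ' = c) k := by
  intro fuel
  induction fuel with
  | zero =>
      intro k hk _ _
      have : k = 0 := by omega
      subst this; rfl
  | succ fuel ih =>
      intro k hk hki hsuf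
      rcases Nat.eq_zero_or_pos k with hk0 | hk0
      · subst hk0
        simp [pvKmpWhile]
      · by_cases hc : s.getD k ' ' = c
        · have : ¬ (0 < k ∧ s.getD k ' ' ≠ c) := by tauto
          simp only [pvKmpWhile, if_neg this]
          exact (Nat.findGreatest_eq ⟨hsuf, hc⟩).symm
        · have hcond : 0 < k ∧ s.getD k ' ' ≠ c := ⟨hk0, hc⟩
          simp only [pvKmpWhile, if_pos hcond]
          have hk1i : k - 1 < i := by omega
          have hpik : pi.getD (k - 1) 0 = pvBrd s (s.take k) := by
            have := hpi (k - 1) hk1i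
            rwa [Nat.sub_add_cancel hk0] at this
          set k' := pvBrd s (s.take k) with hk'
          have hklen : (s.take k).length = k := by
            rw [List.length_take]; omega
          have hk'le : k' ≤ k - 1 := by
            have := pvBrd_le s (s.take k)
            omega
          have hk'suf : s.take k' <:+ s.take i :=
            (pvBrd_suffix s (s.take k)).trans hsuf
          rw [hpik, ih k' (by omega) (by omega) hk'suf]
          refine (pv_fg_shrink (by omega) ?_).symm
          intro m h1 h2 ⟨hsm, hcm⟩
          rcases Nat.lt_or_ge m k with hmk | hmk
          · have hmlen : (s.take m).length = m := by
              rw [List.length_take]; omega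
            have : s.take m <:+ s.take k :=
              pv_suffix_of_suffix_le hsm hsuf (by omega)
            have : m ≤ k' := pv_le_brd (by omega) this
            omega
          · have : m = k := by omega
            subst this; exact hc hcm

-- one step of the prefix-function loop
theorem pvStep_spec (s : List Char) (c : Char) (i : Nat) (h1 : 1 ≤ i) (hi : i < s.length)
    (hc : s.getD i ' ' = c) :
    (let r := Nat.findGreatest (fun m => s.take m <:+ s.take i ∧ s.getD m ' ' = c) (pvBrd s (s.take i));
     if s.getD r ' ' = c then r + 1 else r) = pvBrd s (s.take (i + 1)) := by
  set t := s.take i with ht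
  set k := pvBrd s t with hkdef
  set P : Nat → Prop := fun m => s.take m <:+ t ∧ s.getD m ' ' = c with hP
  set r := Nat.findGreatest P k with hrdef
  have htlen : t.length = i := by rw [ht, List.length_take]; omega
  have ht1len : (s.take (i + 1)).length = i + 1 := by rw [List.length_take]; omega
  have hki : k ≤ i - 1 := by have := pvBrd_le s t; omega
  have hrk : r ≤ k := Nat.findGreatest_le k
  obtain ⟨_, hrP, hrmax⟩ := (Nat.findGreatest_eq_iff (m := r)).mp hrdef.symm
  have hrsuf : s.take r <:+ t := by
    rcases Nat.eq_zero_or_pos r with h0 | h0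
    · rw [h0]; simp
    · exact (hrP (by omega)).1
  have htake1 : s.take (i + 1) = t ++ [c] := by
    rw [ht, ← hc]; exact pv_take_succ_getD hi
  -- any positive border length n of s.take (i+1) yields m = n-1 with P m and m ≤ k
  have hdown : ∀ n, 0 < n → n ≤ i → s.take n <:+ s.take (i + 1) → P (n - 1) ∧ n - 1 ≤ k := by
    intro n hn0 hni hsn
    have hmlt : n - 1 < s.length := by omega
    have htn : s.take n = s.take (n - 1) ++ [s.getD (n - 1) ' '] := by
      have := pv_take_succ_getD hmlt
      rwa [Nat.sub_add_cancel hn0] at this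
    rw [htn, htake1] at hsn
    obtain ⟨hsufm, hcm⟩ := pv_snoc_suffix_snoc.mp hsn
    have hmk : n - 1 ≤ k := pv_le_brd (by omega) hsufm
    exact ⟨⟨hsufm, hcm⟩, hmk⟩
  by_cases hcr : s.getD r ' ' = c
  · simp only [if_pos hcr]
    refine ((Nat.findGreatest_eq_iff (m := r + 1)).mpr ⟨by omega, ?_, ?_⟩).symm
    · intro _
      have hrlt : r < s.length := by omega
      rw [htake1, pv_take_succ_getD hrlt, hcr]
      exact pv_snoc_suffix_snoc.mpr ⟨hrsuf, rfl⟩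
    · intro n hn1 hn2 hsn
      obtain ⟨hPm, hmk⟩ := hdown n (by omega) (by omega) hsn
      have : n - 1 ≤ r := Nat.le_findGreatest hmk hPm
      omega
  · simp only [if_neg hcr]
    have hr0 : r = 0 := by
      by_contra h0
      exact hcr (hrP h0).2
    rw [hr0]
    refine ((Nat.findGreatest_eq_iff (m := 0)).mpr ⟨by omega, fun h => absurd rfl h, ?_⟩).symm
    · intro n hn1 hn2 hsn
      obtain ⟨hPm, hmk⟩ := hdown n (by omega) (by omega) hsn
      have : n - 1 ≤ r := Nat.le_findGreatest hmk hPm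
      have : n - 1 = 0 := by omega
      rw [this] at hPm
      rw [hr0] at hcr
      exact hcr hPm.2

theorem pvPiLoop_spec (s : List Char) :
    ∀ (rest : List Char) (i k : Nat) (pi : List Nat), 1 ≤ i → s.drop i = rest →
      pi.length = i → k = pvBrd s (s.take i) →
      (∀ j, j < i → pi.getD j 0 = pvBrd s (s.take (j + 1))) →
      pvPiLoop s rest k pi = pvBrd s s := by
  intro rest
  induction rest with
  | nil =>
      intro i k pi _ hdrop _ hk _
      have hlen : s.length ≤ i := by
        by_contra h
        have : s.drop i ≠ [] := by
          simp [List.drop_eq_nil_iff]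
          omega
        exact this hdrop
      have : s.take i = s := List.take_of_length_le hlen
      rw [pvPiLoop, hk, this]
  | cons c rest ih =>
      intro i k pi h1 hdrop hpilen hk hpi
      have hi : i < s.length := by
        by_contra h
        rw [List.drop_eq_nil_iff.mpr (by omega)] at hdrop
        exact (List.cons_ne_nil c rest) hdrop.symm
      have hc : s.getD i ' ' = c := by
        have h0 : (s.drop i)[0]? = s[i]? := by
          rw [List.getElem?_drop]
          norm_num
        rw [hdrop] at h0
        simp at h0
        rw [List.getD_eq_getElem?_getD, ← h0]
        rfl
      have hrest : s.drop (i + 1) = rest := by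
        rw [← List.drop_drop, hdrop]
        rfl
      have htilen : (s.take i).length = i := by rw [List.length_take]; omega
      have hklt : k < i := by
        have := pvBrd_le s (s.take i)
        omega
      have hksuf : s.take k <:+ s.take i := hk ▸ pvBrd_suffix s (s.take i)
      rw [pvPiLoop]
      have hk1 : pvKmpWhile s pi c k k
          = Nat.findGreatest (fun m => s.take m <:+ s.take i ∧ s.getD m ' ' = c) k :=
        pvKmpWhile_spec s pi c i (by omega) hpi k k le_rfl hklt hksuf
      set k1 := pvKmpWhile s pi c k k with hk1def
      set k2 := if s.getD k1 ' ' = c then k1 + 1 else k1 with hk2def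
      have hk2 : k2 = pvBrd s (s.take (i + 1)) := by
        have := pvStep_spec s c i h1 hi hc
        simp only at this
        rw [hk2def, hk1, hk]
        rw [hk] at hk1
        exact hk1 ▸ this
      refine ih (i + 1) k2 (pi ++ [k2]) (by omega) hrest (by simp [hpilen]) hk2 ?_
      intro j hj
      rcases Nat.lt_or_ge j i with hji | hji
      · rw [List.getD_append _ _ _ _ (by omega)]
        exact hpi j hji
      · have : j = i := by omega
        subst this
        rw [List.getD_eq_getElem?_getD]
        rw [List.getElem?_append_right (by omega)]
        simp [hpilen, hk2]

-- bridge: border of (piece ++ NUL ++ current) = overlap -----------------------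

theorem pv_brd_eq_ov (p u : List Char) (hp : '\x00' ∉ p) (hu : '\x00' ∉ u) :
    pvBrd (p ++ '\x00' :: u) (p ++ '\x00' :: u) = pvOv p u := by
  set s := p ++ '\x00' :: u with hs
  have hslen : s.length = p.length + u.length + 1 := by simp [hs]; omega
  have husuf : u <:+ s := ((u.suffix_cons '\x00').trans (List.suffix_append p _))
  have hsP : s[p.length]? = some '\x00' := by
    rw [hs, List.getElem?_append_right le_rfl]
    simp
  have hkey : ∀ j, j ≤ p.length + u.length →
      (s.take j <:+ s ↔ (j ≤ min p.length u.length ∧ p.take j <:+ u)) := by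
    intro j hj
    constructor
    · intro hsuf
      have hjlen : (s.take j).length = j := by rw [List.length_take]; omega
      have heq : s.take j = s.drop (s.length - j) := by
        have := List.suffix_iff_eq_drop.mp hsuf
        rwa [hjlen] at this
      set d := s.length - j with hd
      have hd1 : 1 ≤ d := by omega
      -- elementwise consequence of the prefix = suffix equality
      have helem : ∀ m, m < j → s[m]? = s[d + m]? := by
        intro m hm
        have h1 : (s.take j)[m]? = s[m]? := by
          rw [List.getElem?_take_of_lt hm]
        have h2 : (s.take j)[m]? = s[d + m]? := by
          rw [heq, List.getElem?_drop]
        rw [← h1, h2]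
      have hjP : j ≤ p.length := by
        by_contra hP
        have h1 : s[p.length]? = s[d + p.length]? := helem p.length (by omega)
        have h2 : s[d + p.length]? = u[d - 1]? := by
          rw [hs, List.getElem?_append_right (by omega)]
          have : d + p.length - p.length = (d - 1) + 1 := by omega
          rw [this]
          simp
        rw [h1, h2] at hsP
        exact hu (List.mem_of_getElem? hsP)
      have hjU : j ≤ u.length := by
        by_contra hU
        have hdP : d ≤ p.length := by omega
        have h1 : s[p.length - d]? = s[p.length]? := by
          have := helem (p.length - d) (by omega)
          rwa [(by omega : d + (p.length - d) = p.length)] at this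
        have h2 : s[p.length - d]? = p[p.length - d]? := by
          rw [hs, List.getElem?_append_left (by omega)]
        rw [h2, hsP] at h1
        exact hp (List.mem_of_getElem? h1)
      have hpre : s.take j = p.take j := by
        rw [hs, List.take_append_of_le_length hjP]
      have : s.take j <:+ u := by
        refine pv_suffix_of_suffix_le hsuf husuf ?_
        rw [hjlen]
        omega
      exact ⟨by omega, hpre ▸ this⟩
    · rintro ⟨hjm, hsufu⟩
      have hpre : s.take j = p.take j := by
        rw [hs, List.take_append_of_le_length (by omega)]
      rw [hpre]
      exact hsufu.trans husuf
  have hbound : s.length - 1 = p.length + u.length := by omega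
  unfold pvBrd pvOv
  rw [hbound]
  rw [pv_fg_shrink (b' := min p.length u.length) (by omega)
    (fun m h1 h2 hPm => by
      have := (hkey m h2).mp hPm
      omega)]
  exact pv_fg_congr (fun m hm => by
    rw [hkey m (by omega)]
    constructor
    · rintro ⟨_, h⟩; exact h
    · intro h; exact ⟨hm, h⟩)

-- A-side characterisation ----------------------------------------------------

theorem pvALoop_spec (current chunk : List Char) :
    ∀ L : Nat, L ≤ min chunk.length current.length →
      (∀ m, L < m → m ≤ min chunk.length current.length → ¬ chunk.take m <:+ current) →
      pvALoop current chunk (PySem.List.pyRange (L : Int) 0 (-1))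
        = current ++ chunk.drop (Nat.findGreatest (fun j => chunk.take j <:+ current) L) := by
  intro L
  induction L with
  | zero =>
      intro _ _
      rw [PySem.List.pyRange_neg_one_eq_nil (by norm_num)]
      simp [pvALoop]
  | succ L ih =>
      intro hL h
      rw [PySem.List.pyRange_neg_one_cons (by positivity)]
      rw [pvALoop]
      rw [PySem.List.slice_to_natCast, PySem.List.slice_from_natCast]
      by_cases hend : chunk.take (L + 1) <:+ current
      · rw [if_pos (by rw [PySem.Chars.endswith_iff]; exact hend)]
        rw [Nat.findGreatest_eq hend]
      · rw [if_neg (by rw [PySem.Chars.endswith_iff]; exact hend)]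
        have hcast : ((L + 1 : Nat) : Int) - 1 = ((L : Nat) : Int) := by push_cast; ring
        rw [hcast]
        rw [ih (by omega) (fun m h1 h2 => by
          rcases Nat.lt_or_ge (L + 1) m with hm | hm
          · exact h m hm h2
          · have : m = L + 1 := by omega
            subst this; exact hend)]
        rw [Nat.findGreatest_succ, if_neg hend]

theorem pvAMain_eq (current piece : List Char) (hne : piece ≠ []) :
    pvAMain current piece = current ++ piece.drop (pvOv piece current) := by
  unfold pvAMain
  simp only [if_neg hne]
  by_cases hsw : PySem.Chars.startswith piece current = true
  · rw [if_pos hsw]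
    have hpre : current <+: piece := (PySem.Chars.startswith_iff _ _).mp hsw
    have hC : current.length ≤ piece.length := hpre.length_le
    have htake : piece.take current.length = current := (List.prefix_iff_eq_take.mp hpre).symm
    have hOv : pvOv piece current = current.length := by
      unfold pvOv
      rw [Nat.min_comm, Nat.min_eq_left hC]
      exact Nat.findGreatest_eq (by rw [htake])
    rw [hOv]
    nth_rewrite 1 [← htake]
    rw [List.take_append_drop]
  · rw [if_neg hsw]
    by_cases hew : PySem.Chars.endswith current piece = true
    · rw [if_pos hew]
      have hsuf : piece <:+ current := (PySem.Chars.endswith_iff _ _).mp hew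
      have hP : piece.length ≤ current.length := hsuf.length_le
      have hOv : pvOv piece current = piece.length := by
        unfold pvOv
        rw [Nat.min_comm, Nat.min_eq_right hP]
        exact Nat.findGreatest_eq (by simpa using hsuf)
      rw [hOv, List.drop_length, List.append_nil]
    · rw [if_neg hew]
      rw [Nat.min_comm current.length piece.length]
      rw [pvALoop_spec current piece (min piece.length current.length) le_rfl
        (fun m h1 h2 _ => by omega)]
      rfl

-- B-side characterisation ----------------------------------------------------

theorem pvBMain_eq (current piece : List Char) (hne : piece ≠ [])
    (hp : '\x00' ∉ piece) (hu : '\x00' ∉ current) :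
    pvBMain current piece = current ++ piece.drop (pvOv piece current) := by
  simp only [pvBMain, if_neg hne]
  have hslen : 1 ≤ (piece ++ '\x00' :: current).length := by
    simp
    omega
  have htake1 : ((piece ++ '\x00' :: current).take 1).length = 1 := by
    rw [List.length_take]
    omega
  have hbrd1 : pvBrd (piece ++ '\x00' :: current) ((piece ++ '\x00' :: current).take 1) = 0 := by
    unfold pvBrd
    rw [htake1]
    simp
  rw [pvPiLoop_spec (piece ++ '\x00' :: current) (piece ++ '\x00' :: current).tail 1 0 [0]
    le_rfl List.drop_one rfl hbrd1.symm
    (fun j hj => by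
      have : j = 0 := by omega
      subst this
      simp [hbrd1])]
  rw [pv_brd_eq_ov piece current hp hu]

theorem pv_dom_no_nul {s : String} (h : pvDomStr s = true) : '\x00' ∉ s.toList := by
  intro hmem
  unfold pvDomStr at h
  have := List.all_eq_true.mp h _ hmem
  simp [pvDomChar] at this

-- ===== VERDICT (by name: the statement is the Claim_ definition above) =====
theorem append_stream_text_py_spec : Claim_equal_append_stream_text_py := by
  intro current piece hdom
  unfold Spec_append_stream_text_py append_stream_text_py append_stream_text_py_alt
  have hd : pvDomStr current = true ∧ pvDomStr piece = true := by
    unfold Dom_append_stream_text_py at hdom; simpa using hdom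
  congr 1
  by_cases hne : piece.toList = []
  · simp [pvAMain, pvBMain, hne]
  · rw [pvAMain_eq _ _ hne, pvBMain_eq _ _ hne (pv_dom_no_nul hd.2) (pv_dom_no_nul hd.1)]
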